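-- pv_equiv track=rewrite | github.com/greenshelll/QuickMark | utilities/misc/filesystem.py | _reset_order
-- ===== SOURCE A (Python) =====
-- import math
--
-- def _reset_order(reordered_lst, interval):
--     repeat_times = math.floor(len(reordered_lst)/interval)
--     result = []
--     for index in range(len(reordered_lst)):
--         temp_index = index
--         for repeat in range(0,repeat_times+1):
--             temp_index = temp_index + repeat*interval
--             result.append(temp_index)
--             if len(result) == len(reordered_lst): # stop, complete
--                 break
--         if len(result) == len(reordered_lst): #stop complete
--             break
--
--
--     dic = {key:corr for key,corr in zip(result, reordered_lst)}
--     sorted_d = dict(sorted(dic.items()))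
--
--     return list(sorted_d.values())
-- ===== SOURCE B (Python) =====
-- import math
--
-- def _reset_order(reordered_lst, interval):
--     n = len(reordered_lst)
--     block = math.floor(n / interval) + 1
--     if block <= 0:
--         return []
--     dic = {}
--     for i, value in enumerate(reordered_lst):
--         q, r = divmod(i, block)
--         dic[q + interval * r * (r + 1) // 2] = value
--     return [value for _, value in sorted(dic.items())]
-- ===== Notes on version B (the rewrite author's own statement) =====
-- stated objective: alternative
-- what changed: Replaces the nested accumulation loop with double break (which emits index keys by repeatedly adding repeat*interval) by a single pass over enumerate that computes each key in closed form via divmod and the triangular-number formula, inserting straight into the dict.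
import Mathlib
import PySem

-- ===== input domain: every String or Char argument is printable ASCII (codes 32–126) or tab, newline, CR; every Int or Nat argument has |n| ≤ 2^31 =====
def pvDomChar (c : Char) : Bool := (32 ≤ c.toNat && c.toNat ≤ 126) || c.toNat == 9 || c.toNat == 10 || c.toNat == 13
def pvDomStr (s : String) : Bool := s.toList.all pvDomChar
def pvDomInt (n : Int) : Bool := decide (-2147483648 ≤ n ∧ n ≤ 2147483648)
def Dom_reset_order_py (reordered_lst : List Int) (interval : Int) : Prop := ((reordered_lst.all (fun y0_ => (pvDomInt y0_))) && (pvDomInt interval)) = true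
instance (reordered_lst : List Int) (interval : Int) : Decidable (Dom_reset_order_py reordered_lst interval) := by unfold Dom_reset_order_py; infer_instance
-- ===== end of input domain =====

-- B replaces A's nested accumulation loop (with its double break) by one pass over enumerate
-- that computes each key in closed form via divmod and the triangular-number formula (objective: alternative).

-- ===== PORT A =====
-- inner loop: 'for repeat in range(0, repeat_times+1): temp_index += repeat*interval; result.append(temp_index); break when full'
def resetInnerA (interval : Int) (n : Nat) : List Int → Int → List Int → List Int
  | [], _, result => result
  | r :: rs, temp, result =>
    let temp' := temp + r * interval
    let result' := result ++ [temp']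
    if result'.length = n then result' else resetInnerA interval n rs temp' result'

-- outer loop: 'for index in range(len(reordered_lst)): …; break when full'
def resetOuterA (interval : Int) (n : Nat) (rt : Int) : List Int → List Int → List Int
  | [], result => result
  | i :: is, result =>
    let result' := resetInnerA interval n (PySem.List.pyRange 0 (rt + 1)) i result
    if result'.length = n then result' else resetOuterA interval n rt is result'

def reset_order_py (reordered_lst : List Int) (interval : Int) : List Int :=
  let n := reordered_lst.length
  let rt := PySem.Int.floordiv (n : Int) interval
  let result := resetOuterA interval n rt (PySem.List.pyRange 0 (n : Int)) []
  let dic : PySem.Dict Int Int :=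
    (result.zip reordered_lst).foldl (fun d p => d.insert p.1 p.2) PySem.Dict.empty
  (PySem.List.sorted2 dic.items (fun p => p.1) (fun p => p.2) false).map (fun p => p.2)

-- ===== PORT B =====
def reset_order_py_alt (reordered_lst : List Int) (interval : Int) : List Int :=
  let n := reordered_lst.length
  let block := PySem.Int.floordiv (n : Int) interval + 1
  if block ≤ 0 then []
  else
    let dic : PySem.Dict Int Int :=
      (PySem.List.enumerate reordered_lst).foldl
        (fun d p =>
          let q := PySem.Int.floordiv p.1 block
          let r := PySem.Int.mod p.1 block
          d.insert (q + PySem.Int.floordiv (interval * r * (r + 1)) 2) p.2)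
        PySem.Dict.empty
    (PySem.List.sorted2 dic.items (fun p => p.1) (fun p => p.2) false).map (fun p => p.2)

-- ===== PRECONDITION & SPEC =====
-- Python A raises ZeroDivisionError on interval == 0 (B raises there too); nothing else raises.
def Pre_reset_order_py (reordered_lst : List Int) (interval : Int) : Prop := interval ≠ 0
instance (reordered_lst : List Int) (interval : Int) : Decidable (Pre_reset_order_py reordered_lst interval) := by unfold Pre_reset_order_py; infer_instance

def pvWitness_reset_order_py : List Int × Int := ([1, 2, 3, 4, 5], 2)

def Spec_reset_order_py (reordered_lst : List Int) (interval : Int) (out : List Int) : Prop := out = reset_order_py_alt reordered_lst interval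
instance (reordered_lst : List Int) (interval : Int) (out : List Int) : Decidable (Spec_reset_order_py reordered_lst interval out) := by unfold Spec_reset_order_py; infer_instance

-- ===== CLAIM (what is proved, stated in full; the proofs are below) =====
def Claim_equal_reset_order_py : Prop := ∀ (reordered_lst : List Int) (interval : Int), Dom_reset_order_py reordered_lst interval → Pre_reset_order_py reordered_lst interval → Spec_reset_order_py reordered_lst interval (reset_order_py reordered_lst interval)

-- ===== LEMMAS AND PROOFS =====

-- the keys A's inner loop would emit from start value `temp` over the remaining repeats `rs`
def pvGen (interval : Int) : Int → List Int → List Int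
  | _, [] => []
  | temp, r :: rs => (temp + r * interval) :: pvGen interval (temp + r * interval) rs

-- triangular numbers (pvTri r = 0+1+…+r)
def pvTri : Nat → Int
  | 0 => 0
  | n + 1 => pvTri n + (n + 1)

lemma pvTri_double (r : Nat) : ((r : Int) * (r + 1)) = 2 * pvTri r := by
  induction r with
  | zero => simp [pvTri]
  | succ n ih => simp only [pvTri]; push_cast; push_cast at ih; nlinarith [ih]

lemma pvGen_append (interval t : Int) (l₁ l₂ : List Int) :
    pvGen interval t (l₁ ++ l₂) = pvGen interval t l₁ ++ pvGen interval (t + interval * l₁.sum) l₂ := by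
  induction l₁ generalizing t with
  | nil => simp [pvGen]
  | cons r rs ih =>
    simp only [List.cons_append, pvGen, List.sum_cons]
    rw [ih]
    have h : t + r * interval + interval * rs.sum = t + interval * (r + rs.sum) := by ring
    rw [h]

lemma pvGen_range (interval t : Int) (K : Nat) :
    pvGen interval t (PySem.List.pyRange 0 (K : Int)) =
      (List.range K).map (fun r => t + interval * pvTri r) ∧
    (PySem.List.pyRange 0 (K : Int)).sum + K = pvTri K := by
  induction K with
  | zero => simp [PySem.List.pyRange, pvGen, pvTri]
  | succ n ih =>
    have hsplit : PySem.List.pyRange 0 ((n + 1 : Nat) : Int) = PySem.List.pyRange 0 (n : Int) ++ [(n : Int)] := by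
      push_cast
      exact PySem.List.pyRange_one_succ_right (by positivity)
    have hsum : (PySem.List.pyRange 0 (n : Int)).sum = pvTri n - n := by
      have := ih.2; omega
    constructor
    · rw [hsplit, pvGen_append, ih.1, List.range_succ, List.map_append]
      congr 1
      rw [hsum]
      simp only [pvGen, List.map_cons, List.map_nil, List.cons.injEq, and_true]
      ring
    · rw [hsplit, List.sum_append, hsum]
      simp only [List.sum_cons, List.sum_nil, pvTri]
      push_cast
      omega

lemma resetInnerA_spec (interval : Int) (n : Nat) :
    ∀ (rs : List Int) (temp : Int) (res : List Int), res.length < n →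
      resetInnerA interval n rs temp res = (res ++ pvGen interval temp rs).take n := by
  intro rs
  induction rs with
  | nil =>
    intro temp res h
    simp [resetInnerA, pvGen, List.take_of_length_le (le_of_lt h)]
  | cons r rs ih =>
    intro temp res h
    simp only [resetInnerA, pvGen]
    split_ifs with hfull
    · rw [show res ++ (temp + r * interval) :: pvGen interval (temp + r * interval) rs
            = (res ++ [temp + r * interval]) ++ pvGen interval (temp + r * interval) rs by simp,
          List.take_left' hfull]
    · have hlt : (res ++ [temp + r * interval]).length < n := by
        have : (res ++ [temp + r * interval]).length = res.length + 1 := by simp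
        omega
      rw [ih _ _ hlt]
      congr 1
      simp

lemma resetOuterA_spec (interval : Int) (n : Nat) (rt : Int) :
    ∀ (is : List Int) (res : List Int), res.length ≤ n → (is ≠ [] → res.length < n) →
      resetOuterA interval n rt is res =
        (res ++ is.flatMap (fun i => pvGen interval i (PySem.List.pyRange 0 (rt + 1)))).take n := by
  intro is
  induction is with
  | nil => intro res h _; simp [resetOuterA, List.take_of_length_le h]
  | cons i is ih =>
    intro res hle hlt
    have hres : res.length < n := hlt (by simp)
    simp only [resetOuterA]
    rw [resetInnerA_spec interval n _ _ _ hres]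
    have hassoc : res ++ (i :: is).flatMap (fun i => pvGen interval i (PySem.List.pyRange 0 (rt + 1)))
        = (res ++ pvGen interval i (PySem.List.pyRange 0 (rt + 1)))
            ++ is.flatMap (fun i => pvGen interval i (PySem.List.pyRange 0 (rt + 1))) := by
      simp
    set L := res ++ pvGen interval i (PySem.List.pyRange 0 (rt + 1)) with hL
    split_ifs with hfull
    · have hge : n ≤ L.length := by
        have := List.length_take (l := L) (i := n)
        omega
      rw [hassoc, List.take_append_of_le_length hge]
    · have hlen : (L.take n).length = min n L.length := List.length_take
      have hshort : L.length < n := by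
        rcases Nat.lt_or_ge L.length n with h | h
        · exact h
        · exfalso; apply hfull; omega
      rw [List.take_of_length_le (le_of_lt hshort)]
      rw [ih _ (le_of_lt hshort) (fun _ => hshort)]
      rw [hassoc]

lemma pv_flat_take (K : Nat) (hK : 0 < K) :
    ∀ (N : Nat) (g : Nat → Nat → Int) (n : Nat), n ≤ N * K →
      ((List.range N).flatMap (fun i => (List.range K).map (g i))).take n
        = (List.range n).map (fun j => g (j / K) (j % K)) := by
  intro N
  induction N with
  | zero =>
    intro g n hn
    simp at hn
    subst hn
    simp
  | succ N ih =>
    intro g n hn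
    have hNK : (N + 1) * K = N * K + K := by ring
    have hsplit : List.range (N + 1) = List.range 1 ++ (List.range N).map (fun x => 1 + x) := by
      rw [← List.range_add]
      congr 1
      omega
    rw [hsplit, List.flatMap_append, List.flatMap_map]
    simp only [List.range_one, List.flatMap_cons, List.flatMap_nil, List.append_nil]
    by_cases hnK : n ≤ K
    · rw [List.take_append_of_le_length (by simp; omega), ← List.map_take, List.take_range,
          Nat.min_eq_left hnK]
      apply List.map_congr_left
      intro j hj
      have hjn : j < n := List.mem_range.mp hj
      rw [Nat.div_eq_of_lt (by omega), Nat.mod_eq_of_lt (by omega)]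
    · rw [List.take_append, List.take_of_length_le (by simp; omega)]
      simp only [List.length_map, List.length_range]
      rw [ih (fun i r => g (1 + i) r) (n - K) (by omega)]
      have hrange : List.range n = List.range K ++ (List.range (n - K)).map (fun x => K + x) := by
        rw [← List.range_add]
        congr 1
        omega
      rw [hrange, List.map_append, List.map_map]
      congr 1
      · apply List.map_congr_left
        intro j hj
        have hjK : j < K := List.mem_range.mp hj
        rw [Nat.div_eq_of_lt hjK, Nat.mod_eq_of_lt hjK]
      · apply List.map_congr_left
        intro j hj
        simp only [Function.comp]
        rw [Nat.add_comm K j, Nat.add_div_right _ hK, Nat.add_mod_right, Nat.add_comm 1 (j / K)]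

lemma pv_enumerate_zip {α : Type} : ∀ (xs : List α) (s : Int),
    PySem.List.enumerate xs s = ((List.range xs.length).map (fun j : Nat => s + (j : Int))).zip xs := by
  intro xs
  induction xs with
  | nil => intro s; simp [PySem.List.enumerate_nil]
  | cons x t ih =>
    intro s
    rw [PySem.List.enumerate_cons, ih]
    have hlist : (List.range (t.length + 1)).map (fun j : Nat => s + (j : Int))
        = s :: (List.range t.length).map (fun j : Nat => s + 1 + (j : Int)) := by
      rw [List.range_succ_eq_map, List.map_cons, List.map_map]
      simp only [Nat.cast_zero, add_zero, List.cons.injEq, true_and]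
      apply List.map_congr_left
      intro j _
      simp only [Function.comp, Nat.succ_eq_add_one]
      push_cast
      ring
    simp only [List.length_cons, hlist, List.zip_cons_cons]

lemma pv_key_closed (interval : Int) (K : Nat) (j : Nat) :
    PySem.Int.floordiv (0 + (j : Int)) (K : Int) +
      PySem.Int.floordiv (interval * PySem.Int.mod (0 + (j : Int)) (K : Int) * (PySem.Int.mod (0 + (j : Int)) (K : Int) + 1)) 2
    = ((j / K : Nat) : Int) + interval * pvTri (j % K) := by
  rw [zero_add, PySem.Int.floordiv_natCast, PySem.Int.mod_natCast]
  congr 1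
  have h2 : interval * ((j % K : Nat) : Int) * (((j % K : Nat) : Int) + 1) = 2 * (interval * pvTri (j % K)) := by
    have h := pvTri_double (j % K)
    linear_combination interval * h
  rw [h2, PySem.Int.floordiv_eq_ediv_of_pos (by norm_num : (0 : Int) < 2)]
  exact Int.mul_ediv_cancel_left _ (by norm_num)

lemma pv_fold_eq (interval block : Int) (g : Nat → Int)
    (hkey : ∀ j : Nat, PySem.Int.floordiv ((0 : Int) + (j : Int)) block +
        PySem.Int.floordiv (interval * PySem.Int.mod ((0 : Int) + (j : Int)) block * (PySem.Int.mod ((0 : Int) + (j : Int)) block + 1)) 2 = g j) :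
    ∀ (jl : List Nat) (xs : List Int) (d : PySem.Dict Int Int),
      ((jl.map g).zip xs).foldl (fun d p => d.insert p.1 p.2) d =
      ((jl.map (fun j : Nat => (0 : Int) + (j : Int))).zip xs).foldl
        (fun d p =>
          let q := PySem.Int.floordiv p.1 block
          let r := PySem.Int.mod p.1 block
          d.insert (q + PySem.Int.floordiv (interval * r * (r + 1)) 2) p.2) d := by
  intro jl
  induction jl with
  | nil => intro xs d; simp
  | cons j js ih =>
    intro xs d
    cases xs with
    | nil => simp
    | cons x xt =>
      simp only [List.map_cons, List.zip_cons_cons, List.foldl_cons]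
      rw [ih]
      rw [hkey j]

lemma pv_pyRange_nonpos (b : Int) (hb : b ≤ 0) : PySem.List.pyRange 0 b = [] := by
  simp only [PySem.List.pyRange]
  rw [if_neg (by norm_num)]
  rw [if_pos (by norm_num : (0:Int) < 1), if_neg (by omega : ¬ ((0:Int) < b))]
  simp

lemma pv_outer_empty_inner (interval : Int) (n : Nat) (rt : Int)
    (h : PySem.List.pyRange 0 (rt + 1) = []) :
    ∀ is : List Int, resetOuterA interval n rt is [] = [] := by
  intro is
  induction is with
  | nil => rfl
  | cons i it ih =>
    simp only [resetOuterA, h, resetInnerA]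
    split_ifs with hf
    · rfl
    · exact ih

-- ===== VERDICT (by name: the statement is the Claim_ definition above) =====
theorem reset_order_py_spec : Claim_equal_reset_order_py := by
  intro lst interval _ hpre
  unfold Spec_reset_order_py
  simp only [reset_order_py, reset_order_py_alt]
  set n := lst.length with hn
  set rt := PySem.Int.floordiv (n : Int) interval with hrt
  by_cases hb : rt + 1 ≤ 0
  · rw [if_pos hb]
    rw [pv_outer_empty_inner interval n rt (pv_pyRange_nonpos _ hb)]
    simp
    rfl
  · rw [if_neg hb]
    push_neg at hb
    set K : Nat := (rt + 1).toNat with hKdef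
    have hKcast : ((K : Int)) = rt + 1 := Int.toNat_of_nonneg (by omega)
    have hK : 0 < K := by omega
    have hresult : resetOuterA interval n rt (PySem.List.pyRange 0 (n : Int)) [] =
        (List.range n).map (fun j => ((j / K : Nat) : Int) + interval * pvTri (j % K)) := by
      rw [resetOuterA_spec interval n rt _ [] (by simp)
            (fun hne => by
              rw [PySem.List.pyRange_zero_natCast] at hne
              simp only [List.length_nil]
              by_contra h0
              have : n = 0 := by omega
              rw [this] at hne
              simp at hne)]
      rw [PySem.List.pyRange_zero_natCast, List.flatMap_map, List.nil_append]
      have hgen : ∀ i : Nat, pvGen interval ((i : Int)) (PySem.List.pyRange 0 (rt + 1)) =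
          (List.range K).map (fun r => (i : Int) + interval * pvTri r) := by
        intro i
        rw [← hKcast]
        exact (pvGen_range interval (i : Int) K).1
      simp only [hgen]
      exact pv_flat_take K hK n (fun i r => (i : Int) + interval * pvTri r) n
        (Nat.le_mul_of_pos_right n hK)
    rw [hresult]
    rw [pv_enumerate_zip lst 0]
    have hfold := pv_fold_eq interval (rt + 1)
      (fun j => ((j / K : Nat) : Int) + interval * pvTri (j % K))
      (fun j => by rw [← hKcast]; exact pv_key_closed interval K j)
      (List.range n) lst PySem.Dict.empty
    rw [← hn]
    rw [← hfold]
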